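-- pv_equiv track=rewrite | github.com/ShJang32/CodingTest | Python3/프로그래머스/1/12937. 짝수와 홀수/짝수와 홀수.py | solution
-- ===== SOURCE A (Python) =====
-- def solution(num):
--     answer = 'Even'
--
--     num = abs(num) # num은 int 범위의 정수이므로, 음수를 고려해서 절대값 만들어주기
--
--     for i in range(num):
--         if num % 2 == 0 :
--             answer = 'Even'
--         else:
--             answer = 'Odd'
--     return answer
-- ===== SOURCE B (Python) =====
-- def solution(num):
--     return 'Odd' if num % 2 else 'Even'
-- ===== Notes on version B (the rewrite author's own statement) =====
-- stated objective: faster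
-- what changed: Replaced A's O(|num|) loop (which resets the answer on every range iteration) with a single closed-form parity test num % 2.
import Mathlib
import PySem

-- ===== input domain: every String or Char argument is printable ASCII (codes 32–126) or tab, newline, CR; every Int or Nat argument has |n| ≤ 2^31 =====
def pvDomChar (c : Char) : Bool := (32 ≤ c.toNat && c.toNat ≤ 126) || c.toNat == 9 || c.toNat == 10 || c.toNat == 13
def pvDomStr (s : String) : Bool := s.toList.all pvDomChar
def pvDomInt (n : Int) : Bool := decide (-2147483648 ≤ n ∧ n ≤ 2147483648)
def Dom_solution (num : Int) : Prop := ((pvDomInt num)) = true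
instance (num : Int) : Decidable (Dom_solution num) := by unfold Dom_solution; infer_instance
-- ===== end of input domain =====

-- B replaces A's O(|num|) loop with a single closed-form parity test (faster).

-- ===== PORT A =====
-- literal port of A: take abs, then loop over range(num) resetting answer each time
def solution (num : Int) : String :=
  let answer := "Even"
  let num := num.natAbs  -- abs(num)
  (PySem.List.pyRange 0 (num : Int) 1).foldl
    (fun answer _ =>
      if PySem.Int.mod (num : Int) 2 = 0 then "Even" else "Odd")
    answer

-- ===== PORT B =====
def solution_alt (num : Int) : String :=
  if PySem.Int.mod num 2 ≠ 0 then "Odd" else "Even"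

-- ===== PRECONDITION & SPEC =====
def Spec_solution (num : Int) (out : String) : Prop := out = solution_alt num
instance (num : Int) (out : String) : Decidable (Spec_solution num out) := by unfold Spec_solution; infer_instance

-- ===== CLAIM (what is proved, stated in full; the proofs are below) =====
def Claim_equal_solution : Prop := ∀ (num : Int), Dom_solution num → Spec_solution num (solution num)

-- ===== LEMMAS AND PROOFS =====

-- folding the constant-update over a nonempty list yields the constant
theorem foldl_const_update {α : Type} (s : String) (l : List α) (init : String) :
    l ≠ [] → l.foldl (fun _ _ => s) init = s := by
  intro h
  cases l with
  | nil => exact absurd rfl h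
  | cons a t =>
      clear h
      induction t generalizing init a with
      | nil => rfl
      | cons b t ih => simpa only [List.foldl] using ih s b

theorem mod_natAbs_parity (num : Int) :
    PySem.Int.mod ((num.natAbs : Int)) 2 = 0 ↔ PySem.Int.mod num 2 = 0 := by
  simp [PySem.Int.mod, Int.fmod_eq_emod]

-- ===== VERDICT (by name: the statement is the Claim_ definition above) =====
theorem solution_spec : Claim_equal_solution := by
  intro num _
  unfold Spec_solution solution solution_alt
  by_cases h0 : num.natAbs = 0
  · have hz : num = 0 := by omega
    subst hz
    decide
  · have hne : PySem.List.pyRange 0 ((num.natAbs : Int)) 1 ≠ [] := by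
      simp [PySem.List.pyRange]
      omega
    rw [foldl_const_update _ _ _ hne]
    by_cases hp : PySem.Int.mod num 2 = 0
    · rw [if_pos ((mod_natAbs_parity num).mpr hp), if_neg (fun h => h hp)]
    · rw [if_neg (fun h => hp ((mod_natAbs_parity num).mp h)), if_pos hp]
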